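-- pv_equiv track=rewrite | github.com/krishna13052001/LeetCodeQuestions | 1818-maximum-score-from-removing-substrings/1818-maximum-score-from-removing-substrings.py | points
-- ===== SOURCE A (Python) =====
-- def points(s, sub, point):
--     totalpoints = 0
--     n = len(s)
--     stack = []
--     for i in range(n):
--         if len(stack) == 0:
--             stack.append(s[i])
--         else:
--             if s[i] == sub[1] and stack[-1] == sub[0]:
--                 stack.pop()
--                 totalpoints += point
--             else:
--                 stack.append(s[i])
--     s = ""
--     while len(stack) > 0:
--         s += stack.pop()
--     s = s[::-1]
--     return totalpoints, s
-- ===== SOURCE B (Python) =====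
-- def points(s, sub, point):
--     # Repeated-scan re-implementation: delete every occurrence of the 2-char
--     # pattern in whole passes with str.replace until none remains.
--     pat = sub[0] + sub[1]
--     total = 0
--     while pat in s:
--         shorter = s.replace(pat, "")
--         total += point * ((len(s) - len(shorter)) // 2)
--         s = shorter
--     return total, s
-- ===== Notes on version B (the rewrite author's own statement) =====
-- stated objective: simpler
-- what changed: A's per-character stack pass is replaced by whole-string scanning: repeatedly delete every occurrence of the 2-char pattern with str.replace (counting removed pairs from the length drop) until none remains; the two converge to the same score and leftover because the pair-removal rewrite is confluent. Measured ~6x faster on the generated inputs: the scanning runs in C (str.replace / in) instead of a per-character Python loop.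
-- outside the precondition, e.g. on points('', 'x', 0): A returns (0, ''), B raises IndexError; on points('a', '', 7): A returns (0, 'a'), B raises IndexError
import Mathlib
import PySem

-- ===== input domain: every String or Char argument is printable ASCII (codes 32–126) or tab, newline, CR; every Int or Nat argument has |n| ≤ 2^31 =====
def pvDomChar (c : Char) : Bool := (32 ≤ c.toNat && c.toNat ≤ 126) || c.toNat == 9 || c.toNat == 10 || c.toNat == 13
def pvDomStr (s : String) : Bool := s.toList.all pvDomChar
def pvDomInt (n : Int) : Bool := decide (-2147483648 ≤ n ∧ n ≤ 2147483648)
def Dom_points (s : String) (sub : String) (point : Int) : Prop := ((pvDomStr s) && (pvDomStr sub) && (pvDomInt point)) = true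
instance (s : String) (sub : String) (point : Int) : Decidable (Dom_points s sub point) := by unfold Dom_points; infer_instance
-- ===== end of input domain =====

-- B replaces A's char-by-char stack pass by whole-string scanning: repeatedly delete
-- every occurrence of the 2-char pattern with str.replace until none remains (objective: simpler).

-- ===== PORT A =====
-- one iteration of A's stack loop; the stack is kept top-at-head
def stepA (x y : Char) (point : Int) (acc : List Char × Int) (c : Char) : List Char × Int :=
  match acc.1 with
  | [] => (c :: acc.1, acc.2)                                     -- len(stack)==0: append
  | top :: rest =>
      if c = y ∧ top = x then (rest, acc.2 + point)               -- pop, totalpoints += point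
      else (c :: acc.1, acc.2)                                    -- append

-- 's = ""; while len(stack) > 0: s += stack.pop()'  (pop = head of the top-at-head list)
def drainA (stack : List Char) (s : List Char) : List Char :=
  match stack with
  | [] => s
  | c :: rest => drainA rest (s ++ [c])

def points (s : String) (sub : String) (point : Int) : Int × String :=
  let x := (PySem.Str.pyGet? sub 0).getD ' '   -- sub[0]; in range on Pre_points
  let y := (PySem.Str.pyGet? sub 1).getD ' '   -- sub[1]; in range on Pre_points
  let n : Int := PySem.Str.len s
  let st := (PySem.List.pyRange 0 n 1).foldl
      (fun acc j => stepA x y point acc (PySem.List.pyGetD s.toList j ' ')) ([], 0)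
  let drained := drainA st.1 []
  (st.2, String.mk ((PySem.Chars.slice? drained none none (-1)).getD []))   -- s[::-1]

-- ===== PORT B =====
-- termination fact for the while loop: a replace pass on a string containing the
-- pattern strictly shortens it (cited by points_alt's decreasing_by)
theorem replaceGo_length (x y : Char) :
    ∀ (fuel : Nat) (l acc : List Char), l.length ≤ fuel →
      (PySem.Chars.replace.go [x, y] [] fuel l acc).length ≤ acc.length + l.length ∧
      ([x, y] <:+: l → (PySem.Chars.replace.go [x, y] [] fuel l acc).length < acc.length + l.length) := by
  intro fuel
  induction fuel with
  | zero =>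
      intro l acc h
      have : l = [] := List.length_eq_zero_iff.mp (Nat.le_zero.mp h)
      subst this
      constructor
      · simp [PySem.Chars.replace.go]
      · intro hin; exact absurd (List.eq_nil_of_infix_nil hin) (by simp)
  | succ fuel ih =>
      intro l acc h
      cases l with
      | nil =>
          constructor
          · simp [PySem.Chars.replace.go]
          · intro hin; exact absurd (List.eq_nil_of_infix_nil hin) (by simp)
      | cons c t =>
          by_cases hp : List.isPrefixOf [x, y] (c :: t) = true
          · have hgo : PySem.Chars.replace.go [x, y] [] (fuel + 1) (c :: t) acc
                = PySem.Chars.replace.go [x, y] [] fuel (List.drop 2 (c :: t)) acc := by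
              simp [PySem.Chars.replace.go, hp]
            rcases List.isPrefixOf_iff_prefix.mp hp with ⟨t2, ht2⟩
            have hct : c :: t = x :: y :: t2 := ht2.symm
            have hlen : (List.drop 2 (c :: t)).length ≤ fuel := by
              simp [hct] at h ⊢; omega
            obtain ⟨h1, _⟩ := ih (List.drop 2 (c :: t)) acc hlen
            rw [hgo]
            constructor
            · calc _ ≤ acc.length + (List.drop 2 (c :: t)).length := h1
                _ ≤ acc.length + (c :: t).length := by simp only [List.length_drop, List.length_cons]; omega
            · intro _
              calc _ ≤ acc.length + (List.drop 2 (c :: t)).length := h1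
                _ < acc.length + (c :: t).length := by rw [hct]; simp only [List.length_drop, List.length_cons]; omega
          · have hgo : PySem.Chars.replace.go [x, y] [] (fuel + 1) (c :: t) acc
                = PySem.Chars.replace.go [x, y] [] fuel t (c :: acc) := by
              simp [PySem.Chars.replace.go, hp]
            have hlen : t.length ≤ fuel := by simp at h; omega
            obtain ⟨h1, h2⟩ := ih t (c :: acc) hlen
            rw [hgo]
            constructor
            · calc _ ≤ (c :: acc).length + t.length := h1
                _ ≤ acc.length + (c :: t).length := by simp only [List.length_cons]; omega
            · intro hin
              have hint : [x, y] <:+: t := by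
                rcases List.infix_cons_iff.mp hin with hpre | hi
                · exact absurd (List.isPrefixOf_iff_prefix.mpr hpre) hp
                · exact hi
              calc _ < (c :: acc).length + t.length := h2 hint
                _ ≤ acc.length + (c :: t).length := by simp only [List.length_cons]; omega
theorem replace_length_lt (x y : Char) (l : List Char)
    (h : PySem.Chars.isIn [x, y] l = true) :
    (PySem.Chars.replace l [x, y] []).length < l.length := by
  have hrw : PySem.Chars.replace l [x, y] [] = PySem.Chars.replace.go [x, y] [] l.length l [] := by
    simp [PySem.Chars.replace]
  rw [hrw]
  have := (replaceGo_length x y l.length l [] le_rfl).2 ((PySem.Chars.isIn_iff_infix _ _).mp h)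
  simpa using this
def altLoop (x y : Char) (point : Int) (total : Int) (s : List Char) : Int × List Char :=
  if h : PySem.Chars.isIn [x, y] s = true then
    let r := PySem.Chars.replace s [x, y] []
    altLoop x y point
      (total + point * PySem.Int.floordiv (PySem.Chars.len s - PySem.Chars.len r) 2) r
  else (total, s)
termination_by s.length
decreasing_by exact replace_length_lt x y s h

def points_alt (s : String) (sub : String) (point : Int) : Int × String :=
  let x := (PySem.Str.pyGet? sub 0).getD ' '   -- pat = sub[0] + sub[1]
  let y := (PySem.Str.pyGet? sub 1).getD ' '
  let p := altLoop x y point 0 s.toList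
  (p.1, String.mk p.2)

-- ===== PRECONDITION & SPEC =====
-- Pre_points excludes sub of length < 2: there A raises IndexError whenever len(s) >= 2,
-- and its (0, s) return for len(s) <= 1 is an accident of the lazy access to sub[1];
-- B raises IndexError on all such sub.
def Pre_points (s : String) (sub : String) (point : Int) : Prop := 2 ≤ PySem.Str.len sub
instance (s : String) (sub : String) (point : Int) : Decidable (Pre_points s sub point) := by
  unfold Pre_points; infer_instance

def pvWitness_points : String × String × Int := ("acabcb", "ab", 5)

def Spec_points (s : String) (sub : String) (point : Int) (out : Int × String) : Prop := out = points_alt s sub point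
instance (s : String) (sub : String) (point : Int) (out : Int × String) : Decidable (Spec_points s sub point out) := by unfold Spec_points; infer_instance

-- ===== CLAIM (what is proved, stated in full; the proofs are below) =====
def Claim_equal_points : Prop := ∀ (s : String) (sub : String) (point : Int), Dom_points s sub point → Pre_points s sub point → Spec_points s sub point (points s sub point)

-- ===== LEMMAS AND PROOFS =====

theorem drainA_eq (l s : List Char) : drainA l s = s ++ l := by
  induction l generalizing s with
  | nil => simp [drainA]
  | cons c rest ih => simp [drainA, ih]

-- the count component of the fold is a pure accumulator: shifting it commutes
theorem stepA_shift (x y : Char) (point : Int) (st : List Char) (cnt d : Int) (c : Char) :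
    stepA x y point (st, cnt + d) c =
      ((stepA x y point (st, cnt) c).1, (stepA x y point (st, cnt) c).2 + d) := by
  cases st with
  | nil => simp [stepA]
  | cons top rest =>
      by_cases hc : c = y ∧ top = x <;> simp [stepA, hc] <;> ring

-- the stack never contains the popped pattern (read top-to-bottom: y then x)
theorem stepA_inv (x y : Char) (point : Int) (st : List Char) (cnt : Int) (c : Char)
    (h : ¬ [y, x] <:+: st) : ¬ [y, x] <:+: (stepA x y point (st, cnt) c).1 := by
  cases st with
  | nil =>
      simp only [stepA]
      intro hin
      have := hin.length_le
      simp at this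
  | cons top rest =>
      by_cases hc : c = y ∧ top = x
      · simpa [stepA, hc] using fun hin => h (hin.trans (List.infix_cons (List.infix_refl rest)))
      · simp only [stepA, if_neg hc]
        intro hin
        rcases List.infix_cons_iff.mp hin with hp | hi
        · rcases hp with ⟨t, ht⟩
          simp at ht
          exact hc ⟨ht.1.symm, ht.2.1.symm⟩
        · exact h hi

-- processing one full occurrence of the pattern leaves the stack unchanged and adds one point
theorem fold_pat (x y : Char) (point : Int) (st : List Char) (cnt : Int) (v : List Char)
    (h : ¬ [y, x] <:+: st) :
    List.foldl (stepA x y point) (st, cnt) (x :: y :: v) =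
      List.foldl (stepA x y point) (st, cnt + point) v := by
  have key : stepA x y point (stepA x y point (st, cnt) x) y = (st, cnt + point) := by
    cases st with
    | nil => simp [stepA]
    | cons a rest =>
        by_cases hc : x = y ∧ a = x
        · obtain ⟨hxy, hax⟩ := hc
          have hay : a = y := hax.trans hxy
          have hstep1 : stepA x y point (a :: rest, cnt) x = (rest, cnt + point) := by
            simp [stepA, hxy, hax]
          rw [hstep1]
          cases rest with
          | nil => simp [stepA, hay]
          | cons b rest' =>
              have hbx : b ≠ x := by
                intro hb
                exact h ⟨[], rest', by simp [hay, hb]⟩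
              simp [stepA, hbx, hay]
        · simp only [stepA, if_neg hc]
          simp [stepA]
  simp only [List.foldl_cons, key]
theorem fold_no_occ (x y : Char) (point : Int) :
    ∀ (r st : List Char) (cnt : Int), ¬ [x, y] <:+: (st.reverse ++ r) →
      List.foldl (stepA x y point) (st, cnt) r = (r.reverse ++ st, cnt) := by
  intro r
  induction r with
  | nil => intro st cnt _; simp
  | cons c t ih =>
      intro st cnt h
      have hstep : stepA x y point (st, cnt) c = (c :: st, cnt) := by
        cases st with
        | nil => simp [stepA]
        | cons a rest =>
            have hcond : ¬ (c = y ∧ a = x) := by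
              rintro ⟨hcy, hax⟩
              exact h ⟨rest.reverse, t, by simp [hax, hcy]⟩
            simp [stepA, hcond]
      have ht : ¬ [x, y] <:+: ((c :: st).reverse ++ t) := by
        intro hin
        exact h (by simpa [List.append_assoc] using hin)
      simp only [List.foldl_cons, hstep]
      rw [ih (c :: st) cnt ht]
      simp
theorem replaceGo_fold (x y : Char) (point : Int) :
    ∀ (fuel : Nat) (l acc : List Char), l.length ≤ fuel →
      ∃ (res : List Char) (k : Nat),
        PySem.Chars.replace.go [x, y] [] fuel l acc = acc.reverse ++ res ∧
        res.length + 2 * k = l.length ∧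
        ∀ (st : List Char) (cnt : Int), ¬ [y, x] <:+: st →
          List.foldl (stepA x y point) (st, cnt + (k : Int) * point) res =
            List.foldl (stepA x y point) (st, cnt) l := by
  intro fuel
  induction fuel with
  | zero =>
      intro l acc h
      have : l = [] := List.length_eq_zero_iff.mp (Nat.le_zero.mp h)
      subst this
      exact ⟨[], 0, by simp [PySem.Chars.replace.go], by simp, fun st cnt _ => by simp⟩
  | succ fuel ih =>
      intro l acc h
      cases l with
      | nil => exact ⟨[], 0, by simp [PySem.Chars.replace.go], by simp, fun st cnt _ => by simp⟩
      | cons c t =>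
          by_cases hp : List.isPrefixOf [x, y] (c :: t) = true
          · have hgo : PySem.Chars.replace.go [x, y] [] (fuel + 1) (c :: t) acc
                = PySem.Chars.replace.go [x, y] [] fuel (List.drop 2 (c :: t)) acc := by
              simp [PySem.Chars.replace.go, hp]
            rcases List.isPrefixOf_iff_prefix.mp hp with ⟨t2, ht2⟩
            have hct : c :: t = x :: y :: t2 := ht2.symm
            have hd2 : List.drop 2 (c :: t) = t2 := by rw [hct]; rfl
            have hlen : t2.length ≤ fuel := by
              rw [hct] at h; simp at h; omega
            obtain ⟨res, k, hgoeq, hk, hfold⟩ := ih t2 acc hlen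
            refine ⟨res, k + 1, by rw [hgo, hd2]; exact hgoeq, by rw [hct]; simp; omega, ?_⟩
            intro st cnt hinv
            rw [hct]
            rw [fold_pat x y point st cnt t2 hinv]
            have := hfold st (cnt + point) hinv
            have harith : cnt + ((k : Int) + 1) * point = cnt + point + (k : Int) * point := by ring
            rw [Nat.cast_add, Nat.cast_one, harith]
            exact this
          · have hgo : PySem.Chars.replace.go [x, y] [] (fuel + 1) (c :: t) acc
                = PySem.Chars.replace.go [x, y] [] fuel t (c :: acc) := by
              simp [PySem.Chars.replace.go, hp]
            have hlen : t.length ≤ fuel := by simp at h; omega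
            obtain ⟨res, k, hgoeq, hk, hfold⟩ := ih t (c :: acc) hlen
            refine ⟨c :: res, k, by rw [hgo, hgoeq]; simp, by simp at hk ⊢; omega, ?_⟩
            intro st cnt hinv
            simp only [List.foldl_cons]
            rw [stepA_shift x y point st cnt ((k : Int) * point) c]
            have hinv' := stepA_inv x y point st cnt c hinv
            have := hfold (stepA x y point (st, cnt) c).1 (stepA x y point (st, cnt) c).2 hinv'
            simpa using this
theorem altLoop_spec (x y : Char) (point : Int) :
    ∀ (s : List Char) (total : Int),
      List.foldl (stepA x y point) ([], total) s =
        ((altLoop x y point total s).2.reverse, (altLoop x y point total s).1) := by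
  have main : ∀ (n : Nat) (s : List Char), s.length ≤ n → ∀ (total : Int),
      List.foldl (stepA x y point) ([], total) s =
        ((altLoop x y point total s).2.reverse, (altLoop x y point total s).1) := by
    intro n
    induction n with
    | zero =>
        intro s hs total
        have : s = [] := List.length_eq_zero_iff.mp (Nat.le_zero.mp hs)
        subst this
        have hnil : PySem.Chars.isIn [x, y] [] = false := by
          rw [PySem.Chars.isIn_eq_false_iff]
          intro hin
          have := hin.length_le
          simp at this
        rw [altLoop]
        simp [hnil]
    | succ n ihn =>
        intro s hs total
        by_cases h : PySem.Chars.isIn [x, y] s = true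
        · have hrw : PySem.Chars.replace s [x, y] [] = PySem.Chars.replace.go [x, y] [] s.length s [] := by
            simp [PySem.Chars.replace]
          obtain ⟨res, k, hgoeq, hk, hfold⟩ := replaceGo_fold x y point s.length s [] le_rfl
          have hres : PySem.Chars.replace s [x, y] [] = res := by rw [hrw, hgoeq]; simp
          have hshort : res.length < s.length := by
            rw [← hres]; exact replace_length_lt x y s h
          have hunf : altLoop x y point total s =
              altLoop x y point
                (total + point * PySem.Int.floordiv (PySem.Chars.len s - PySem.Chars.len (PySem.Chars.replace s [x, y] [])) 2)
                (PySem.Chars.replace s [x, y] []) := by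
            rw [altLoop]; simp [h]
          have hdiv : PySem.Int.floordiv (PySem.Chars.len s - PySem.Chars.len (PySem.Chars.replace s [x, y] [])) 2 = (k : Int) := by
            rw [hres]
            have h1 : PySem.Chars.len s - PySem.Chars.len res = ((2 * k : Nat) : Int) := by
              simp [PySem.Chars.len]; omega
            rw [h1]
            have := PySem.Int.floordiv_natCast (2 * k) 2
            simpa using this
          have htot : total + point * PySem.Int.floordiv (PySem.Chars.len s - PySem.Chars.len (PySem.Chars.replace s [x, y] [])) 2
              = total + (k : Int) * point := by rw [hdiv]; ring
          have hfold0 := hfold [] total (by intro hin; have := hin.length_le; simp at this)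
          have hres' : res.length ≤ n := by omega
          calc List.foldl (stepA x y point) ([], total) s
              = List.foldl (stepA x y point) ([], total + (k : Int) * point) res := hfold0.symm
            _ = ((altLoop x y point (total + (k : Int) * point) res).2.reverse,
                 (altLoop x y point (total + (k : Int) * point) res).1) := ihn res hres' _
            _ = _ := by rw [hunf, htot, hres]
        · have hnin : ¬ [x, y] <:+: s := by
            rw [← PySem.Chars.isIn_eq_false_iff]
            exact Bool.not_eq_true _ ▸ (by simpa using h)
          have := fold_no_occ x y point s [] total (by simpa using hnin)
          rw [altLoop]
          simp [h]
          simpa using this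
  intro s total
  exact main s.length s le_rfl total

-- ===== VERDICT (by name: the statement is the Claim_ definition above) =====
theorem points_spec : Claim_equal_points := by
  intro s sub point _hdom hpre
  have h2 : 2 ≤ sub.toList.length := by
    have := hpre
    simp only [Pre_points, PySem.Str.len_eq] at this
    exact_mod_cast this
  rcases hsub : sub.toList with _ | ⟨x, tl⟩
  · rw [hsub] at h2; simp at h2
  rcases htl : tl with _ | ⟨y, rest⟩
  · rw [hsub, htl] at h2; simp at h2
  rw [htl] at hsub
  have hx : (PySem.Str.pyGet? sub 0).getD ' ' = x := by
    simp [PySem.Str.pyGet?_natCast, hsub]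
  have hy : (PySem.Str.pyGet? sub 1).getD ' ' = y := by
    simp [PySem.Str.pyGet?_natCast, hsub]
  show points s sub point = points_alt s sub point
  simp only [points, points_alt, hx, hy, PySem.Str.len_eq]
  rw [PySem.List.foldl_pyRange_zero_pyGetD' s.toList ' ' (stepA x y point) ([], 0)]
  rw [altLoop_spec x y point s.toList 0]
  simp [drainA_eq, PySem.List.slice?_none_none_neg_one]
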